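-- pv_equiv track=rewrite | github.com/Monterolautaro/practicas_python | fundamentos-python/dictionaries/dictionaries.py | multi_word_search
-- ===== SOURCE A (Python) =====
-- def multi_word_search(doc_list, keywords):
--     """
--     Takes list of documents (each document is a string) and a list of keywords.
--     Returns a dictionary where each key is a keyword, and the value is a list of indices
--     (from doc_list) of the documents containing that keyword
--
--     >>> doc_list = ["The Learn Python Challenge Casino.", "They bought a car and a casino", "Casinoville"]
--     >>> keywords = ['casino', 'they']
--     >>> multi_word_search(doc_list, keywords)
--     {'casino': [0, 1], 'they': [1]}
--     """
--     res = {}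
--
--     for keyword in keywords:
--         res[keyword] = []  # inicializo una lista vacía para cada keyword
--
--         # el método enumerate funciona para iterar sobre una secuencia (como listas, tuplas, cadenas de texto o rangos de números).
--         # Devuelve el índice, y el elemento actual de la secuencia.
--         for i, doc in enumerate(doc_list):
--             # normalizo y proceso el documento en palabras
--             words = [parte.strip('.,!?') for subcadena in doc.lower().split(' ') for parte in subcadena.split(',')]
--
--             # Si la palabra clave está en las palabras procesadas, agrega el índice del documento
--             if keyword in words:
--                 res[keyword].append(i)
--
--     return res
-- ===== SOURCE B (Python) =====
-- def multi_word_search(doc_list, keywords):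
--     index = {}
--     for i, doc in enumerate(doc_list):
--         for word in [parte.strip('.,!?') for subcadena in doc.lower().split(' ') for parte in subcadena.split(',')]:
--             ids = index.setdefault(word, [])
--             if not ids or ids[-1] != i:
--                 ids.append(i)
--     return {kw: index.get(kw, []) for kw in keywords}
-- ===== Notes on version B (the rewrite author's own statement) =====
-- stated objective: faster
-- what changed: B builds an inverted index word->doc-indices in one pass over the documents (tokenizing each document once) and then answers every keyword by a single dictionary lookup, instead of A's re-tokenizing every document once per keyword.
import Mathlib
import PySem

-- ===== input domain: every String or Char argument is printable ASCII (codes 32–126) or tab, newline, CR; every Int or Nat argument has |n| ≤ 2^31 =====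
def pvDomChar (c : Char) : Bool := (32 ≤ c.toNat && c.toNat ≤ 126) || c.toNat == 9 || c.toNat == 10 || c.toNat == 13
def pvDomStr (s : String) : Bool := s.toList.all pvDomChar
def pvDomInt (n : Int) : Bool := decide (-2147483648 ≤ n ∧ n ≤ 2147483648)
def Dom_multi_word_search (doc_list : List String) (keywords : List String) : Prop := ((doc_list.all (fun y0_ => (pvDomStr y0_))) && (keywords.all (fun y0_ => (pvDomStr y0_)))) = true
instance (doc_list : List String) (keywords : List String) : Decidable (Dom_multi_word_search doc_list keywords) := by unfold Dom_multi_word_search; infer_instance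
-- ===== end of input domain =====

-- B replaces A's keyword-outer rescan of all documents with a single inverted-index pass over the documents plus one lookup per keyword (faster asymptotically: O(tokens + keywords) vs O(keywords × tokens)).


-- ===== PORT A =====
-- the tokenization pipeline both Pythons share: [parte.strip('.,!?') for subcadena in doc.lower().split(' ') for parte in subcadena.split(',')]
def pvWords (doc : String) : List String :=
  (((PySem.Str.lower doc).splitOn " ").flatMap (fun subcadena => subcadena.splitOn ",")).map
    (fun parte => PySem.Str.stripChars parte ".,!?")

def multi_word_search (doc_list : List String) (keywords : List String) : List (String × List Int) :=
  (keywords.foldl (fun res keyword =>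
      (PySem.List.enumerate doc_list).foldl (fun res p =>
          let words := pvWords p.2
          if words.contains keyword then
            PySem.Dict.insert res keyword (PySem.Dict.getD res keyword [] ++ [p.1])
          else res)
        (PySem.Dict.insert res keyword ([] : List Int)))
    PySem.Dict.empty).items

-- ===== PORT B =====
def multi_word_search_alt (doc_list : List String) (keywords : List String) : List (String × List Int) :=
  let index := (PySem.List.enumerate doc_list).foldl (fun idx p =>
      (pvWords p.2).foldl (fun idx word =>
          let idx := PySem.Dict.setdefault idx word ([] : List Int)
          let ids := PySem.Dict.getD idx word []
          if ids = [] ∨ ids.getLast? ≠ some p.1 then PySem.Dict.insert idx word (ids ++ [p.1]) else idx)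
        idx)
    PySem.Dict.empty
  (keywords.foldl (fun res kw => PySem.Dict.insert res kw (PySem.Dict.getD index kw [])) PySem.Dict.empty).items

-- ===== PRECONDITION & SPEC =====
def Spec_multi_word_search (doc_list : List String) (keywords : List String) (out : List (String × List Int)) : Prop := out = multi_word_search_alt doc_list keywords
instance (doc_list : List String) (keywords : List String) (out : List (String × List Int)) : Decidable (Spec_multi_word_search doc_list keywords out) := by unfold Spec_multi_word_search; infer_instance

-- ===== CLAIM (what is proved, stated in full; the proofs are below) =====
def Claim_equal_multi_word_search : Prop := ∀ (doc_list : List String) (keywords : List String), Dom_multi_word_search doc_list keywords → Spec_multi_word_search doc_list keywords (multi_word_search doc_list keywords)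

-- ===== LEMMAS AND PROOFS =====

-- the common value: indices of documents whose token list contains kw
def pvTarget (doc_list : List String) (kw : String) : List Int :=
  ((PySem.List.enumerate doc_list).filter (fun p => (pvWords p.2).contains kw)).map (·.1)

theorem pv_getD_setdefault_of_ne (d : PySem.Dict String (List Int)) (k k' : String)
    (v d0 : List Int) (h : k' ≠ k) :
    PySem.Dict.getD (PySem.Dict.setdefault d k v) k' d0 = PySem.Dict.getD d k' d0 := by
  rw [PySem.Dict.getD_eq_get?_getD, PySem.Dict.get?_setdefault_of_ne d v h,
    ← PySem.Dict.getD_eq_get?_getD]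

theorem pvA_inner (kw : String) (l : List (Int × String))
    (res : PySem.Dict String (List Int)) (acc : List Int) :
    l.foldl (fun res p =>
        let words := pvWords p.2
        if words.contains kw then
          PySem.Dict.insert res kw (PySem.Dict.getD res kw [] ++ [p.1])
        else res)
      (PySem.Dict.insert res kw acc)
    = PySem.Dict.insert res kw (acc ++ (l.filter (fun p => (pvWords p.2).contains kw)).map (·.1)) := by
  induction l generalizing acc with
  | nil => simp
  | cons p t ih =>
    simp only [List.foldl_cons, List.filter_cons]
    by_cases h : (pvWords p.2).contains kw
    · simp only [h, if_pos, PySem.Dict.getD_insert_self, PySem.Dict.insert_insert_self, ih,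
        List.map_cons, List.append_assoc, List.singleton_append]
    · simp only [h, Bool.false_eq_true, if_false, ih]

theorem pvB_inner (i : Int) (ws : List String) (idx : PySem.Dict String (List Int)) (w : String) :
    (ws.foldl (fun idx word =>
        let idx := PySem.Dict.setdefault idx word ([] : List Int)
        let ids := PySem.Dict.getD idx word []
        if ids = [] ∨ ids.getLast? ≠ some i then PySem.Dict.insert idx word (ids ++ [i]) else idx)
      idx).getD w []
    = PySem.Dict.getD idx w [] ++
        (if w ∈ ws ∧ (PySem.Dict.getD idx w []).getLast? ≠ some i then [i] else []) := by
  induction ws generalizing idx with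
  | nil => simp
  | cons w' t ih =>
    simp only [List.foldl_cons]
    have hself : PySem.Dict.getD (PySem.Dict.setdefault idx w' ([] : List Int)) w' [] =
        PySem.Dict.getD idx w' [] := PySem.Dict.getD_setdefault_self _ _ _ _
    by_cases hc : (PySem.Dict.getD idx w' ([] : List Int)).getLast? = some i
    · have hcond : ¬ (PySem.Dict.getD (PySem.Dict.setdefault idx w' ([] : List Int)) w' [] = [] ∨
          (PySem.Dict.getD (PySem.Dict.setdefault idx w' ([] : List Int)) w' []).getLast? ≠ some i) := by
        rw [hself]
        rintro (h | h)
        · rw [h] at hc; simp at hc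
        · exact h hc
      rw [if_neg hcond, ih]
      by_cases hw : w = w'
      · subst hw
        rw [hself]
        simp [hc]
      · rw [pv_getD_setdefault_of_ne _ _ _ _ _ hw]
        simp [List.mem_cons, hw]
    · have hcond : (PySem.Dict.getD (PySem.Dict.setdefault idx w' ([] : List Int)) w' [] = [] ∨
          (PySem.Dict.getD (PySem.Dict.setdefault idx w' ([] : List Int)) w' []).getLast? ≠ some i) := by
        rw [hself]; exact Or.inr hc
      rw [if_pos hcond, ih]
      by_cases hw : w = w'
      · subst hw
        rw [PySem.Dict.getD_insert_self, hself]
        have hlast : (PySem.Dict.getD idx w [] ++ [i]).getLast? = some i := by simp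
        simp [hlast, hc]
      · have hne : PySem.Dict.getD (PySem.Dict.insert (PySem.Dict.setdefault idx w' ([] : List Int)) w'
            (PySem.Dict.getD (PySem.Dict.setdefault idx w' ([] : List Int)) w' [] ++ [i])) w []
            = PySem.Dict.getD idx w [] := by
          rw [PySem.Dict.getD_insert, if_neg hw, pv_getD_setdefault_of_ne _ _ _ _ _ hw]
        rw [hne]
        simp [List.mem_cons, hw]

theorem pvB_outer (docs : List String) (k : Int) (idx : PySem.Dict String (List Int))
    (H : ∀ w j, j ∈ PySem.Dict.getD idx w ([] : List Int) → j < k) (w : String) :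
    ((PySem.List.enumerate docs k).foldl (fun idx p =>
        (pvWords p.2).foldl (fun idx word =>
            let idx := PySem.Dict.setdefault idx word ([] : List Int)
            let ids := PySem.Dict.getD idx word []
            if ids = [] ∨ ids.getLast? ≠ some p.1 then PySem.Dict.insert idx word (ids ++ [p.1]) else idx)
          idx)
      idx).getD w []
    = PySem.Dict.getD idx w [] ++
        ((PySem.List.enumerate docs k).filter (fun p => (pvWords p.2).contains w)).map (·.1) := by
  induction docs generalizing k idx with
  | nil => simp [PySem.List.enumerate_nil]
  | cons d t ih =>
    rw [PySem.List.enumerate_cons]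
    simp only [List.foldl_cons, List.filter_cons]
    have hstep : ∀ w', (((pvWords d).foldl (fun idx word =>
        let idx := PySem.Dict.setdefault idx word ([] : List Int)
        let ids := PySem.Dict.getD idx word []
        if ids = [] ∨ ids.getLast? ≠ some k then PySem.Dict.insert idx word (ids ++ [k]) else idx)
      idx).getD w' [])
      = PySem.Dict.getD idx w' [] ++ (if w' ∈ pvWords d then [k] else []) := by
      intro w'
      rw [pvB_inner]
      congr 1
      have hne : (PySem.Dict.getD idx w' ([] : List Int)).getLast? ≠ some k := by
        intro hEq
        have : k ∈ PySem.Dict.getD idx w' ([] : List Int) := List.mem_of_getLast? hEq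
        exact absurd (H w' k this) (lt_irrefl k)
      by_cases hmem : w' ∈ pvWords d <;> simp [hmem, hne]
    have H' : ∀ w' j, j ∈ (((pvWords d).foldl (fun idx word =>
        let idx := PySem.Dict.setdefault idx word ([] : List Int)
        let ids := PySem.Dict.getD idx word []
        if ids = [] ∨ ids.getLast? ≠ some k then PySem.Dict.insert idx word (ids ++ [k]) else idx)
      idx).getD w' ([] : List Int)) → j < k + 1 := by
      intro w' j hj
      rw [hstep w'] at hj
      rcases List.mem_append.mp hj with hj | hj
      · exact lt_trans (H w' j hj) (by omega)
      · by_cases hmem : w' ∈ pvWords d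
        · simp [hmem] at hj; omega
        · simp [hmem] at hj
    rw [ih (k + 1) _ H', hstep w]
    by_cases hmem : (pvWords d).contains w
    · have : w ∈ pvWords d := by simpa using hmem
      simp [this]
    · have : ¬ w ∈ pvWords d := by simpa using hmem
      simp [this]

-- ===== VERDICT (by name: the statement is the Claim_ definition above) =====
theorem multi_word_search_spec : Claim_equal_multi_word_search := by
  intro doc_list keywords _
  unfold Spec_multi_word_search multi_word_search multi_word_search_alt
  have hA : ∀ (res : PySem.Dict String (List Int)) (kw : String),
      (PySem.List.enumerate doc_list).foldl (fun res p =>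
          let words := pvWords p.2
          if words.contains kw then
            PySem.Dict.insert res kw (PySem.Dict.getD res kw [] ++ [p.1])
          else res)
        (PySem.Dict.insert res kw ([] : List Int))
      = PySem.Dict.insert res kw (pvTarget doc_list kw) := by
    intro res kw
    rw [pvA_inner]
    rfl
  have hB : ∀ kw, PySem.Dict.getD ((PySem.List.enumerate doc_list).foldl (fun idx p =>
      (pvWords p.2).foldl (fun idx word =>
          let idx := PySem.Dict.setdefault idx word ([] : List Int)
          let ids := PySem.Dict.getD idx word []
          if ids = [] ∨ ids.getLast? ≠ some p.1 then PySem.Dict.insert idx word (ids ++ [p.1]) else idx)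
        idx)
    PySem.Dict.empty) kw []
      = pvTarget doc_list kw := by
    intro kw
    rw [pvB_outer doc_list 0 PySem.Dict.empty (by intro w j hj; simp [PySem.Dict.getD_empty] at hj)]
    simp [pvTarget, PySem.Dict.getD_empty]
  simp only []
  congr 1
  apply PySem.List.foldl_congr_mem
  intro acc kw _
  rw [hA, hB]
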